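-- pv_equiv track=rewrite | github.com/phamngocquy/MIID-subnet | standalone_variations/response_utils.py | _pad_to
-- ===== SOURCE A (Python) =====
-- from typing import List, Dict, Optional
--
-- def _pad_to(xs: List[str], n: int) -> List[str]:
--     if not xs:
--         return []
--     out = xs[:]
--     i = 0
--     while len(out) < n:
--         out.append(xs[i % len(xs)])
--         i += 1
--     return out[:n]
-- ===== SOURCE B (Python) =====
-- def _pad_to(xs, n):
--     if not xs:
--         return []
--     reps = max(1, n // len(xs) + 1)
--     return (xs * reps)[:n]
-- ===== Notes on version B (the rewrite author's own statement) =====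
-- stated objective: idiomatic
-- what changed: Replaces the element-by-element append loop with modulo indexing by a closed-form construction: compute the needed repetition count, build xs * reps by list multiplication and slice to n.
import Mathlib
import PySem

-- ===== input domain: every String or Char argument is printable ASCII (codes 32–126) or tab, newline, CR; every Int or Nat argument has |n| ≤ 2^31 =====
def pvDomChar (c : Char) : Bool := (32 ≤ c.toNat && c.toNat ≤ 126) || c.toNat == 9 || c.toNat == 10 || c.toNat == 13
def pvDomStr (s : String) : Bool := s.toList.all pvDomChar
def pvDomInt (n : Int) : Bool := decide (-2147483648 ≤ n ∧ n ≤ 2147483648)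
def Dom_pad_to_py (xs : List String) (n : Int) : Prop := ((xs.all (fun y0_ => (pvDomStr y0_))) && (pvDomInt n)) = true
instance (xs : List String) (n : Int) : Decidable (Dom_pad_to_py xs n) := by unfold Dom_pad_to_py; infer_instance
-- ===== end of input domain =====

-- B replaces A's append/modulo growth loop with a closed-form construction: list multiplication plus one slice.

-- ===== PORT A =====
-- while len(out) < n: out.append(xs[i % len(xs)]); i += 1
-- (the index i % len(xs) is always in range for nonempty xs, so getD "" is exact)
def padLoopA (xs : List String) (n : Int) (out : List String) (i : Int) : List String :=
  if _h : (out.length : Int) < n then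
    padLoopA xs n (out ++ [xs.getD (PySem.Int.mod i (xs.length : Int)).toNat ""]) (i + 1)
  else out
termination_by (n - out.length).toNat
decreasing_by simp; omega

def pad_to_py (xs : List String) (n : Int) : List String :=
  if xs = [] then []
  else PySem.List.slice (padLoopA xs n xs 0) none (some n)

-- ===== PORT B =====
def pad_to_py_alt (xs : List String) (n : Int) : List String :=
  if xs = [] then []
  else
    let reps : Int := max 1 (PySem.Int.floordiv n (xs.length : Int) + 1)
    PySem.List.slice (List.flatten (List.replicate reps.toNat xs)) none (some n)

-- ===== PRECONDITION & SPEC =====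
def Spec_pad_to_py (xs : List String) (n : Int) (out : List String) : Prop := out = pad_to_py_alt xs n
instance (xs : List String) (n : Int) (out : List String) : Decidable (Spec_pad_to_py xs n out) := by unfold Spec_pad_to_py; infer_instance

-- ===== CLAIM (what is proved, stated in full; the proofs are below) =====
def Claim_equal_pad_to_py : Prop := ∀ (xs : List String) (n : Int), Dom_pad_to_py xs n → Spec_pad_to_py xs n (pad_to_py xs n)

-- ===== LEMMAS AND PROOFS =====

-- the first k elements of the cyclic extension of xs
def cyc (xs : List String) (k : Nat) : List String :=
  (List.range k).map (fun j => xs.getD (j % xs.length) "")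

theorem cyc_self (xs : List String) : cyc xs xs.length = xs := by
  apply List.ext_getElem
  · simp [cyc]
  · intro i h1 h2
    simp [cyc] at h1 ⊢
    rw [Nat.mod_eq_of_lt (by simpa [cyc] using h1)]
    simp [List.getElem?_eq_getElem (by simpa [cyc] using h1)]

theorem cyc_add_self (xs : List String) (m : Nat) :
    cyc xs (xs.length + m) = xs ++ cyc xs m := by
  unfold cyc
  rw [List.range_add, List.map_append, List.map_map]
  congr 1
  · exact cyc_self xs
  · apply List.map_congr_left
    intro j _
    simp [Nat.add_mod_left]

theorem cyc_take (xs : List String) (k m : Nat) :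
    (cyc xs m).take k = cyc xs (min k m) := by
  unfold cyc
  rw [← List.map_take, List.take_range]

theorem length_cyc (xs : List String) (k : Nat) : (cyc xs k).length = k := by
  simp [cyc]

theorem flatten_replicate_cyc (xs : List String) (r : Nat) :
    List.flatten (List.replicate r xs) = cyc xs (r * xs.length) := by
  induction r with
  | zero => simp [cyc]
  | succ r ih =>
    rw [List.replicate_succ, List.flatten_cons, ih, ← cyc_add_self]
    congr 1
    ring

theorem padLoopA_cyc (xs : List String) (n : Int) (hxs : xs ≠ []) (m : Nat) :
    padLoopA xs n (cyc xs (xs.length + m)) ((m : Nat) : Int)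
      = cyc xs (max (xs.length + m) n.toNat) := by
  by_cases h : ((xs.length + m : Nat) : Int) < n
  · have hlt : xs.length + m < n.toNat := by omega
    rw [padLoopA]
    simp only [length_cyc, h, dif_pos]
    have hlen : 0 < xs.length := List.length_pos_of_ne_nil hxs
    have hmod : PySem.Int.mod ((m : Nat) : Int) ((xs.length : Nat) : Int)
        = ((m % xs.length : Nat) : Int) := PySem.Int.mod_natCast m xs.length
    have happ : cyc xs (xs.length + m) ++ [xs.getD ((m % xs.length : Nat)) ""]
        = cyc xs (xs.length + (m + 1)) := by
      show _ = cyc xs ((xs.length + m) + 1)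
      unfold cyc
      rw [List.range_succ, List.map_append]
      simp [Nat.add_mod_left]
    have := padLoopA_cyc xs n hxs (m + 1)
    rw [hmod]
    simp only [Int.toNat_natCast]
    rw [happ]
    have hcast : ((m : Nat) : Int) + 1 = (((m + 1 : Nat)) : Int) := by push_cast; ring
    rw [hcast, this]
    congr 1
    omega
  · rw [padLoopA]
    simp only [length_cyc, h, dif_neg, not_false_iff]
    congr 1
    omega
termination_by (n - (xs.length + m)).toNat
decreasing_by omega

theorem pad_eq (xs : List String) (n : Int) : pad_to_py xs n = pad_to_py_alt xs n := by
  unfold pad_to_py pad_to_py_alt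
  by_cases hxs : xs = []
  · simp [hxs]
  · simp only [hxs, ite_false]
    have hlen : 0 < xs.length := List.length_pos_of_ne_nil hxs
    have hloop : padLoopA xs n xs 0 = cyc xs (max xs.length n.toNat) := by
      have := padLoopA_cyc xs n hxs 0
      simpa [cyc_self] using this
    rw [hloop]
    by_cases hn : n < (xs.length : Int)
    · -- no padding needed: both slice xs itself
      have hmax : max xs.length n.toNat = xs.length := by omega
      have hfd : PySem.Int.floordiv n (xs.length : Int) < 1 := by
        rw [PySem.Int.floordiv_lt_iff_lt_mul (by omega)]
        omega
      have hreps : max 1 (PySem.Int.floordiv n (xs.length : Int) + 1) = 1 := by omega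
      rw [hmax, cyc_self, hreps]
      simp
    · -- n ≥ len(xs): both are the first n.toNat elements of the cycle
      have h0n : 0 ≤ n := by omega
      have hmax : max xs.length n.toNat = n.toNat := by omega
      have hfd1 : 1 ≤ PySem.Int.floordiv n (xs.length : Int) := by
        rw [PySem.Int.le_floordiv_iff_mul_le (by omega)]
        omega
      have hreps : max 1 (PySem.Int.floordiv n (xs.length : Int) + 1)
          = PySem.Int.floordiv n (xs.length : Int) + 1 := by omega
      have hbig : n.toNat ≤ (PySem.Int.floordiv n (xs.length : Int) + 1).toNat * xs.length := by
        have hlt : n < (PySem.Int.floordiv n (xs.length : Int) + 1) * (xs.length : Int) :=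
          (PySem.Int.floordiv_lt_iff_lt_mul (by omega)).mp (by omega)
        have hnn : 0 ≤ PySem.Int.floordiv n (xs.length : Int) + 1 := by omega
        have hc : (n : Int) < (((PySem.Int.floordiv n (xs.length : Int) + 1).toNat * xs.length : Nat) : Int) := by
          push_cast [Int.toNat_of_nonneg hnn]
          exact hlt
        omega
      rw [hreps, hmax, flatten_replicate_cyc]
      rw [PySem.List.slice_to _ h0n, PySem.List.slice_to _ h0n, cyc_take, cyc_take]
      congr 1
      omega

-- ===== VERDICT (by name: the statement is the Claim_ definition above) =====
theorem pad_to_py_spec : Claim_equal_pad_to_py := by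
  intro xs n _
  exact pad_eq xs n
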